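-- pv_equiv track=rewrite | github.com/EMMAXZZZ/supabase-configurator | app/utils/validation.py | compatibility_score
-- ===== SOURCE A (Python) =====
-- from typing import Iterable, Tuple, List
--
-- FORBIDDEN_CHARS: str = "@$:/#?%=;&{}*!|><\\"
--
-- def compatibility_score(value: str, allowed: Iterable[str]) -> int:
--     """Compute a simple compatibility score (0-100).
--
--     Heuristic: percentage of characters inside the allowed set and not forbidden.
--
--     Args:
--         value (str): Input string.
--         allowed (Iterable[str]): Allowed characters.
--
--     Returns:
--         int: Score from 0 to 100.
--     """
--     if not value:
--         return 100
--     allowed_set = set(allowed)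
--     total = len(value)
--     good = 0
--     for ch in value:
--         if ch in allowed_set and ch not in FORBIDDEN_CHARS:
--             good += 1
--     return int(round(100 * good / total))
-- ===== SOURCE B (Python) =====
-- from typing import Iterable
--
-- FORBIDDEN_CHARS: str = "@$:/#?%=;&{}*!|><\\"
--
-- def compatibility_score(value, allowed):
--     """Score = percentage of characters of value that are allowed and not forbidden.
--
--     Inverts A's traversal: instead of scanning value character by character with
--     membership tests, build the effective alphabet (single allowed characters
--     that are not forbidden) and sum, over that alphabet, how often each of its
--     characters occurs in value via str.count.  Correct because the alphabet is a
--     set (each character counted once) and only single characters can ever match.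
--     """
--     if not value:
--         return 100
--     effective = {ch for ch in allowed if len(ch) == 1 and ch not in FORBIDDEN_CHARS}
--     good = sum(value.count(ch) for ch in effective)
--     return int(round(100 * good / len(value)))
-- ===== Notes on version B (the rewrite author's own statement) =====
-- stated objective: alternative
-- what changed: B inverts the traversal: it builds the effective alphabet (single allowed characters minus forbidden ones) and sums value.count(ch) over that alphabet, instead of A's scan of value with two membership tests per character.
import Mathlib
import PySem

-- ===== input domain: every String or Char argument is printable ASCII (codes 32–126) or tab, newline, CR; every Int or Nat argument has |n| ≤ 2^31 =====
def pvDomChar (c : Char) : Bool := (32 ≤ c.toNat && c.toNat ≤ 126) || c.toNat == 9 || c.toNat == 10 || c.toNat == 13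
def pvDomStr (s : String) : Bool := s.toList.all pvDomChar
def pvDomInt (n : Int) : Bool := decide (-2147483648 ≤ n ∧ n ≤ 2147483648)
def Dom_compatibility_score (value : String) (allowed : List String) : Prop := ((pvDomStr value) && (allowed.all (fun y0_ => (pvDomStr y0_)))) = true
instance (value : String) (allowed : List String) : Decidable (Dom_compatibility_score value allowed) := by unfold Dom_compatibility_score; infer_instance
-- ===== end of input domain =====

-- B inverts the traversal: it sums value.count(ch) over the effective alphabet (single
-- allowed characters minus forbidden) instead of scanning value with membership tests;
-- alternative decomposition, same result.

-- ===== PORT A =====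
def pvForbidden : String := "@$:/#?%=;&{}*!|><\\"

-- int(round(100*good/total)) for 0 ≤ p = 100*good, 0 < t = total: Python's float division is
-- exact at every tie (half-integers ≤ 100 are exact doubles) and round() is half-to-even,
-- so the result is the half-to-even rounding of the exact rational p/t. Shared by both ports.
def pvRoundDiv (p t : Int) : Int :=
  let q := PySem.Int.floordiv p t
  let r := PySem.Int.mod p t
  if 2 * r < t then q
  else if t < 2 * r then q + 1
  else if PySem.Int.mod q 2 = 0 then q else q + 1

def compatibility_score (value : String) (allowed : List String) : Int :=
  if value = "" then 100
  else
    let allowed_set : PySem.Set String := PySem.Set.ofList allowed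
    let total : Int := PySem.Str.len value
    let good : Int := value.toList.foldl
      (fun good ch =>
        if PySem.Set.contains allowed_set ch.toString && !(PySem.Str.isIn ch.toString pvForbidden)
        then good + 1 else good) 0
    pvRoundDiv (100 * good) total

-- ===== PORT B =====
def compatibility_score_alt (value : String) (allowed : List String) : Int :=
  if value = "" then 100
  else
    let effective : PySem.Set String :=
      PySem.Set.ofList (allowed.filter
        (fun ch => PySem.Str.len ch == 1 && !(PySem.Str.isIn ch pvForbidden)))
    let good : Int := (effective.map (fun ch => (PySem.Str.count value ch : Int))).sum
    pvRoundDiv (100 * good) (PySem.Str.len value)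

-- ===== PRECONDITION & SPEC =====
def Spec_compatibility_score (value : String) (allowed : List String) (out : Int) : Prop := out = compatibility_score_alt value allowed
instance (value : String) (allowed : List String) (out : Int) : Decidable (Spec_compatibility_score value allowed out) := by unfold Spec_compatibility_score; infer_instance

-- ===== CLAIM (what is proved, stated in full; the proofs are below) =====
def Claim_equal_compatibility_score : Prop := ∀ (value : String) (allowed : List String), Dom_compatibility_score value allowed → Spec_compatibility_score value allowed (compatibility_score value allowed)

-- ===== LEMMAS AND PROOFS =====

-- Python's s.count(sub) for a single-character sub counts the occurrences of that character.
theorem pv_count_go_singleton (c : Char) (v : List Char) :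
    ∀ (fuel acc : Nat), v.length ≤ fuel →
      PySem.Chars.count.go [c] fuel v acc = acc + v.count c := by
  induction v with
  | nil =>
      intro fuel acc _
      cases fuel <;> simp [PySem.Chars.count.go]
  | cons h t ih =>
      intro fuel acc hf
      cases fuel with
      | zero => simp at hf
      | succ n =>
          have ht : t.length ≤ n := by simpa using hf
          by_cases hc : h = c
          · subst hc
            simp [PySem.Chars.count.go, List.isPrefixOf, ih n (acc + 1) ht,
              List.count_cons_self]
            omega
          · have hb : (c == h) = false :=
              beq_eq_false_iff_ne.mpr (fun h' => hc h'.symm)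
            have hb2 : (h == c) = false := beq_eq_false_iff_ne.mpr hc
            have hcc : (h :: t).count c = t.count c := by
              rw [List.count_cons, hb2]
              simp
            simp [PySem.Chars.count.go, List.isPrefixOf, hb, ih n acc ht, hcc]

theorem pv_count_singleton (c : Char) (v : List Char) :
    PySem.Chars.count v [c] = v.count c := by
  simpa using pv_count_go_singleton c v v.length 0 le_rfl

-- Char.toString is injective
theorem pv_toString_inj (a c : Char) (h : a.toString = c.toString) : a = c := by
  have h2 := congrArg String.toList h
  simpa using h2

-- counting characters whose singleton string lies in k :: L splits off the count of k's char
theorem pv_countP_cons (v : List Char) (k : String) (L : List String) (c : Char)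
    (hck : c.toString = k) (hknotin : k ∉ L) :
    v.countP (fun x => decide (x.toString ∈ k :: L))
      = v.count c + v.countP (fun x => decide (x.toString ∈ L)) := by
  induction v with
  | nil => simp
  | cons a t iht =>
      simp only [List.countP_cons, List.count_cons, iht]
      by_cases hac : a = c
      · subst hac
        have h1 : decide (a.toString ∈ k :: L) = true := by
          rw [← hck]
          simp
        have h2 : decide (a.toString ∈ L) = false := by
          rw [hck]
          simpa using hknotin
        rw [h1, h2]
        simp
        omega
      · have h3 : decide (a.toString ∈ k :: L) = decide (a.toString ∈ L) := by
          have hank : a.toString ≠ k :=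
            fun h => hac (pv_toString_inj a c (h.trans hck.symm))
          simp only [List.mem_cons, decide_eq_decide]
          exact or_iff_right hank
        have h4 : (a == c) = false :=
          beq_eq_false_iff_ne.mpr hac
        rw [h3, h4]
        simp
        omega

-- Summing the char-counts of a duplicate-free list of single-character strings over s
-- counts the characters of s whose singleton string lies in the list.
theorem pv_sum_counts (s : String) :
    ∀ (L : List String), L.Nodup → (∀ k ∈ L, k.toList.length = 1) →
      (L.map (fun k => ((PySem.Str.count s k : Nat) : Int))).sum
        = ((s.toList.countP (fun c => decide (c.toString ∈ L)) : Nat) : Int) := by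
  intro L
  induction L with
  | nil => simp
  | cons k L ih =>
      intro hnd hlen
      obtain ⟨c, hcl⟩ : ∃ c, k.toList = [c] :=
        List.length_eq_one_iff.mp (hlen k (by simp))
      have hck : c.toString = k := by
        apply String.toList_inj.mp
        simp [hcl]
      have hknotin : k ∉ L := (List.nodup_cons.mp hnd).1
      have hndL : L.Nodup := (List.nodup_cons.mp hnd).2
      have hlenL : ∀ x ∈ L, x.toList.length = 1 := fun x hx => hlen x (by simp [hx])
      have hcount : PySem.Str.count s k = s.toList.count c := by
        rw [PySem.Str.count_eq, hcl, pv_count_singleton]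
      rw [List.map_cons, List.sum_cons, ih hndL hlenL, hcount,
        pv_countP_cons s.toList k L c hck hknotin]
      push_cast
      ring

-- the per-character test of A is membership of the char's singleton string in B's alphabet
theorem pv_pred_eq (allowed : List String) (c : Char) :
    (PySem.Set.contains (PySem.Set.ofList allowed) c.toString
      && !(PySem.Str.isIn c.toString pvForbidden))
    = decide (c.toString ∈ PySem.Set.ofList (allowed.filter
        (fun ch => PySem.Str.len ch == 1 && !(PySem.Str.isIn ch pvForbidden)))) := by
  have hlen : (PySem.Str.len c.toString == 1) = true := by simp [PySem.Str.len]
  rw [Bool.eq_iff_iff]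
  simp only [Bool.and_eq_true, Bool.not_eq_true', PySem.Set.contains_eq_decide,
    decide_eq_true_eq, PySem.Set.mem_ofList, List.mem_filter, hlen, Bool.true_and]

-- the two "good" values agree
theorem pv_good_eq (value : String) (allowed : List String) :
    value.toList.foldl
      (fun good ch =>
        if PySem.Set.contains (PySem.Set.ofList allowed) ch.toString
            && !(PySem.Str.isIn ch.toString pvForbidden)
        then good + 1 else good) 0
    = ((PySem.Set.ofList (allowed.filter
          (fun ch => PySem.Str.len ch == 1 && !(PySem.Str.isIn ch pvForbidden)))).map
          (fun ch => (PySem.Str.count value ch : Int))).sum := by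
  set L : List String := PySem.Set.ofList (allowed.filter
    (fun ch => PySem.Str.len ch == 1 && !(PySem.Str.isIn ch pvForbidden))) with hLdef
  have hnd : L.Nodup := PySem.Set.nodup_ofList _
  have hlen : ∀ k ∈ L, k.toList.length = 1 := by
    intro k hk
    rw [hLdef, PySem.Set.mem_ofList] at hk
    have hq := (List.mem_filter.mp hk).2
    have h1 : (PySem.Str.len k == 1) = true := by
      cases h : (PySem.Str.len k == 1) with
      | true => rfl
      | false => rw [h] at hq; simp at hq
    have h2 : PySem.Str.len k = 1 := by simpa using h1
    simp only [PySem.Str.len] at h2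
    omega
  rw [PySem.List.foldl_if_add_one, zero_add, pv_sum_counts value L hnd hlen]
  congr 1
  apply List.countP_congr
  intro c _
  rw [pv_pred_eq allowed c]

-- ===== VERDICT (by name: the statement is the Claim_ definition above) =====
theorem compatibility_score_spec : Claim_equal_compatibility_score := by
  intro value allowed _
  unfold Spec_compatibility_score compatibility_score compatibility_score_alt
  by_cases hv : value = ""
  · simp [hv]
  · simp only [hv, if_false]
    rw [pv_good_eq value allowed]
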